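-- pv_equiv track=rewrite | github.com/IntiMG/Calculito | models/positional_notation.py | descomponer_base_10
-- ===== SOURCE A (Python) =====
-- def descomponer_base_10(numero: int):
--     """
--     Descompone un número entero en base 10 usando potencias de 10.
--
--     Retorna:
--       - expresion_suma: string tipo "8 × 10^4 + 4 × 10^3 + ..."
--       - pasos: lista de strings con cada multiplicación
--       - resultado: el número original (comprobación de la suma)
--     """
--     if numero < 0:
--         raise ValueError("Solo se permiten números enteros no negativos para esta descomposición.")
--
--     numero_str = str(numero)
--     longitud = len(numero_str)
--
--     pasos = []
--     terminos = []
--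
--     for i, digito_char in enumerate(numero_str):
--         # posición desde la izquierda → potencia desde la derecha
--         digito = int(digito_char)
--         potencia = longitud - i - 1
--         valor_posicional = 10 ** potencia
--         producto = digito * valor_posicional
--
--         # "mostrar la multiplicación de cada cifra por su valor posicional"
--         pasos.append(
--             f"{digito} × 10^{potencia} = {digito} × {valor_posicional} = {producto}"
--         )
--
--         # término tipo "8 × 10^4"
--         terminos.append(f"{digito} × 10^{potencia}")
--
--     # "mostrar la suma final"
--     expresion_suma = " + ".join(terminos) + f" = {numero}"
--
--     return expresion_suma, pasos, numero
-- ===== SOURCE B (Python) =====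
-- def descomponer_base_10(numero: int):
--     """Same decomposition, but digits are extracted arithmetically by repeated
--     divmod by 10 (least-significant first), then both lists are reversed."""
--     if numero < 0:
--         raise ValueError("Solo se permiten números enteros no negativos para esta descomposición.")
--
--     if numero == 0:
--         return "0 × 10^0 = 0", ["0 × 10^0 = 0 × 1 = 0"], 0
--
--     pasos_rev = []
--     terminos_rev = []
--     n = numero
--     potencia = 0
--     valor_posicional = 1
--     while n > 0:
--         n, digito = divmod(n, 10)
--         producto = digito * valor_posicional
--         pasos_rev.append(f"{digito} × 10^{potencia} = {digito} × {valor_posicional} = {producto}")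
--         terminos_rev.append(f"{digito} × 10^{potencia}")
--         potencia += 1
--         valor_posicional *= 10
--
--     expresion_suma = " + ".join(reversed(terminos_rev)) + f" = {numero}"
--     return expresion_suma, pasos_rev[::-1], numero
-- ===== Notes on version B (the rewrite author's own statement) =====
-- stated objective: alternative
-- what changed: B extracts digits arithmetically by repeated divmod by ten, least-significant-first, maintaining the positional value incrementally, and reverses the collected lists, instead of iterating over str(numero) and recomputing the power per digit; a zero input is an explicit special case.
import Mathlib
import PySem

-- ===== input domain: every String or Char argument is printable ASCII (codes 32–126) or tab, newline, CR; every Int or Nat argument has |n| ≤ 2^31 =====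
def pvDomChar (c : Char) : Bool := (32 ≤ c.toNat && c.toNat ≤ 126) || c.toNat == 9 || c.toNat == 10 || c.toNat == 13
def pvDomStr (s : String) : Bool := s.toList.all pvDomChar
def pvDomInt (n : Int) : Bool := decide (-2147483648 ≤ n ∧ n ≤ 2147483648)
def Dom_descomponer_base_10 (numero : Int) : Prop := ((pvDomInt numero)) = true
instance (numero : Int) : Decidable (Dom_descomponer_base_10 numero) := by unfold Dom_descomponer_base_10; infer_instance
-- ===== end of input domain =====

-- B decomposes by repeated divmod by 10 (least-significant first) and reverses, instead of
-- iterating over str(numero); same exact strings, objective: alternative/idiomatic.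

-- ===== PORT A =====
-- f"{digito} × 10^{potencia} = {digito} × {valor_posicional} = {producto}"
def pasoA (digito potencia valor producto : Int) : String :=
  PySem.Int.toStr digito ++ " × 10^" ++ PySem.Int.toStr potencia ++ " = " ++
    PySem.Int.toStr digito ++ " × " ++ PySem.Int.toStr valor ++ " = " ++ PySem.Int.toStr producto

-- f"{digito} × 10^{potencia}"
def terminoA (digito potencia : Int) : String :=
  PySem.Int.toStr digito ++ " × 10^" ++ PySem.Int.toStr potencia

-- one iteration of A's for-loop body (the pair is (pasos, terminos))
def stepA (longitud : Int) (acc : List String × List String) (p : Int × Char) :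
    List String × List String :=
  let digito : Int := (PySem.Int.ofChars? [p.2]).getD 0  -- int(digito_char); always a digit char here
  let potencia : Int := longitud - p.1 - 1
  let valor_posicional : Int := (10 : Int) ^ potencia.toNat  -- 10 ** potencia; potencia ≥ 0 here
  let producto : Int := digito * valor_posicional
  (acc.1 ++ [pasoA digito potencia valor_posicional producto],
   acc.2 ++ [terminoA digito potencia])

def descomponer_base_10 (numero : Int) : String × List String × Int :=
  -- Python raises ValueError for numero < 0: those inputs are excluded by Pre_
  let numero_str := PySem.Int.toChars numero          -- str(numero), as its character list
  let longitud : Int := numero_str.length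
  let res := (PySem.List.enumerate numero_str 0).foldl (stepA longitud) ([], [])
  let expresion_suma := PySem.Str.join " + " res.2 ++ (" = " ++ PySem.Int.toStr numero)
  (expresion_suma, res.1, numero)

-- ===== PORT B =====
def pasoB (digito potencia valor producto : Int) : String :=
  PySem.Int.toStr digito ++ " × 10^" ++ PySem.Int.toStr potencia ++ " = " ++
    PySem.Int.toStr digito ++ " × " ++ PySem.Int.toStr valor ++ " = " ++ PySem.Int.toStr producto

def terminoB (digito potencia : Int) : String :=
  PySem.Int.toStr digito ++ " × 10^" ++ PySem.Int.toStr potencia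

-- the while-loop: n > 0 throughout, so it runs on a Nat; divmod(n, 10) = (n / 10, n % 10)
def altLoop (n : Nat) (potencia valor : Int) : List String × List String :=
  if h : n = 0 then ([], [])
  else
    let digito : Int := (n % 10 : Nat)
    let producto := digito * valor
    let rest := altLoop (n / 10) (potencia + 1) (valor * 10)
    (pasoB digito potencia valor producto :: rest.1,
     terminoB digito potencia :: rest.2)
  decreasing_by exact Nat.div_lt_self (Nat.pos_of_ne_zero h) (by norm_num)

def descomponer_base_10_alt (numero : Int) : String × List String × Int :=
  -- numero < 0 raises ValueError (outside Pre_)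
  if numero = 0 then ("0 × 10^0 = 0", ["0 × 10^0 = 0 × 1 = 0"], 0)
  else
    let r := altLoop numero.toNat 0 1   -- while n > 0 loop; numero > 0 inside Pre_
    (PySem.Str.join " + " r.2.reverse ++ (" = " ++ PySem.Int.toStr numero),
     r.1.reverse, numero)

-- ===== PRECONDITION & SPEC =====
-- Pre_ excludes exactly the negative inputs, on which Python A raises ValueError.
def Pre_descomponer_base_10 (numero : Int) : Prop := 0 ≤ numero
instance (numero : Int) : Decidable (Pre_descomponer_base_10 numero) := by
  unfold Pre_descomponer_base_10; infer_instance

def pvWitness_descomponer_base_10 : Int := 305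

def Spec_descomponer_base_10 (numero : Int) (out : String × List String × Int) : Prop :=
  out = descomponer_base_10_alt numero
instance (numero : Int) (out : String × List String × Int) :
    Decidable (Spec_descomponer_base_10 numero out) := by
  unfold Spec_descomponer_base_10; infer_instance

-- ===== CLAIM =====
def Claim_equal_descomponer_base_10 : Prop :=
  ∀ (numero : Int), Dom_descomponer_base_10 numero → Pre_descomponer_base_10 numero →
    Spec_descomponer_base_10 numero (descomponer_base_10 numero)

-- ===== LEMMAS AND PROOFS =====

-- A's per-digit strings, as functions of the enumerate pair
def pasoOf (len : Int) (p : Int × Char) : String :=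
  pasoA ((PySem.Int.ofChars? [p.2]).getD 0) (len - p.1 - 1)
    ((10 : Int) ^ (len - p.1 - 1).toNat)
    (((PySem.Int.ofChars? [p.2]).getD 0) * (10 : Int) ^ (len - p.1 - 1).toNat)

def termOf (len : Int) (p : Int × Char) : String :=
  terminoA ((PySem.Int.ofChars? [p.2]).getD 0) (len - p.1 - 1)

lemma stepA_eq (len : Int) (acc : List String × List String) (p : Int × Char) :
    stepA len acc p = (acc.1 ++ [pasoOf len p], acc.2 ++ [termOf len p]) := rfl

lemma foldA (len : Int) (L : List (Int × Char)) :
    ∀ (a b : List String),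
      L.foldl (stepA len) (a, b) = (a ++ L.map (pasoOf len), b ++ L.map (termOf len)) := by
  induction L with
  | nil => intro a b; simp
  | cons p L ih =>
      intro a b
      simp [List.foldl_cons, stepA_eq, ih]

-- B's lists over an explicit digit list (least significant first)
def specP : List Nat → Int → Int → List String
  | [], _, _ => []
  | d :: ds, p, v => pasoB (d : Int) p v ((d : Int) * v) :: specP ds (p + 1) (v * 10)

def specT : List Nat → Int → Int → List String
  | [], _, _ => []
  | d :: ds, p, _v => terminoB (d : Int) p :: specT ds (p + 1) (_v * 10)

lemma altLoop_eq (m : Nat) : ∀ (p v : Int),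
    altLoop m p v = (specP (Nat.digits 10 m) p v, specT (Nat.digits 10 m) p v) := by
  induction m using Nat.strong_induction_on with
  | _ m ih =>
    intro p v
    by_cases h : m = 0
    · subst h; simp [altLoop, specP, specT]
    · rw [altLoop, dif_neg h,
        Nat.digits_def' (by norm_num : (1:Nat) < 10) (Nat.pos_of_ne_zero h)]
      rw [ih (m / 10) (Nat.div_lt_self (Nat.pos_of_ne_zero h) (by norm_num))]
      simp [specP, specT]

lemma length_specP (ds : List Nat) : ∀ p v, (specP ds p v).length = ds.length := by
  induction ds with
  | nil => intro p v; rfl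
  | cons d ds ih => intro p v; simp [specP, ih]

lemma length_specT (ds : List Nat) : ∀ p v, (specT ds p v).length = ds.length := by
  induction ds with
  | nil => intro p v; rfl
  | cons d ds ih => intro p v; simp [specT, ih]

lemma specP_get (ds : List Nat) : ∀ (p v : Int) (j : Nat) (h : j < ds.length),
    (specP ds p v)[j]'(by rw [length_specP]; exact h)
      = pasoB (ds[j] : Int) (p + j) (v * 10 ^ j) ((ds[j] : Int) * (v * 10 ^ j)) := by
  induction ds with
  | nil => intro p v j h; simp at h
  | cons d ds ih =>
      intro p v j h
      cases j with
      | zero => simp [specP]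
      | succ j =>
          simp only [specP, List.getElem_cons_succ]
          rw [ih (p + 1) (v * 10) j (by simpa using h)]
          congr 1 <;> [skip; ring; ring]
          push_cast; ring

lemma specT_get (ds : List Nat) : ∀ (p v : Int) (j : Nat) (h : j < ds.length),
    (specT ds p v)[j]'(by rw [length_specT]; exact h)
      = terminoB (ds[j] : Int) (p + j) := by
  induction ds with
  | nil => intro p v j h; simp at h
  | cons d ds ih =>
      intro p v j h
      cases j with
      | zero => simp [specT]
      | succ j =>
          simp only [specT, List.getElem_cons_succ]
          rw [ih (p + 1) (v * 10) j (by simpa using h)]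
          congr 1
          push_cast; ring

-- digit characters
lemma ofChars?_digitChar (d : Nat) (h : d < 10) :
    PySem.Int.ofChars? [Nat.digitChar d] = some (d : Int) := by
  interval_cases d <;> decide

lemma toDigits_eq (m : Nat) (hm : 0 < m) :
    Nat.toDigits 10 m = ((Nat.digits 10 m).map Nat.digitChar).reverse := by
  induction m using Nat.strong_induction_on with
  | _ m ih =>
    by_cases hlt : m < 10
    · rw [Nat.toDigits_of_lt_base hlt,
        Nat.digits_def' (by norm_num : (1:Nat) < 10) hm,
        Nat.div_eq_of_lt hlt, Nat.mod_eq_of_lt hlt]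
      simp
    · have h10 : 10 ≤ m := le_of_not_gt hlt
      have hdiv : 0 < m / 10 := Nat.div_pos h10 (by norm_num)
      rw [Nat.toDigits_of_base_le (by norm_num) h10,
        Nat.digits_def' (by norm_num : (1:Nat) < 10) hm,
        ih (m / 10) (Nat.div_lt_self hm (by norm_num)) hdiv]
      simp

-- the heart: A's mapped lists are B's lists reversed
lemma map_pasoOf (ds : List Nat) (hds : ∀ d ∈ ds, d < 10) :
    (PySem.List.enumerate ((ds.map Nat.digitChar).reverse) 0).map (pasoOf (ds.length : Int))
      = (specP ds 0 1).reverse := by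
  apply List.ext_getElem
  · simp [PySem.List.length_enumerate, length_specP]
  · intro i h1 h2
    have hlen : (PySem.List.enumerate ((ds.map Nat.digitChar).reverse) 0).length = ds.length := by
      simp [PySem.List.length_enumerate]
    have hi : i < ds.length := by simpa [PySem.List.length_enumerate] using h1
    have hj : ds.length - 1 - i < ds.length := by omega
    rw [List.getElem_map, PySem.List.getElem_enumerate]
    rw [List.getElem_reverse]
    simp only [List.getElem_map, List.length_map]
    rw [List.getElem_reverse]
    simp only [length_specP]
    rw [specP_get ds 0 1 (ds.length - 1 - i) hj]
    have hd : ds[ds.length - 1 - i] < 10 := hds _ (List.getElem_mem _)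
    have hoc := ofChars?_digitChar _ hd
    have hpot : ((ds.length : Int) - (0 + (i : Int)) - 1) = ((0 : Int) + (ds.length - 1 - i : Nat)) := by
      omega
    simp only [pasoOf, pasoA, pasoB, hoc, Option.getD_some]
    rw [hpot]
    norm_num

lemma map_termOf (ds : List Nat) (hds : ∀ d ∈ ds, d < 10) :
    (PySem.List.enumerate ((ds.map Nat.digitChar).reverse) 0).map (termOf (ds.length : Int))
      = (specT ds 0 1).reverse := by
  apply List.ext_getElem
  · simp [PySem.List.length_enumerate, length_specT]
  · intro i h1 h2
    have hi : i < ds.length := by simpa [PySem.List.length_enumerate] using h1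
    have hj : ds.length - 1 - i < ds.length := by omega
    rw [List.getElem_map, PySem.List.getElem_enumerate]
    rw [List.getElem_reverse]
    simp only [List.getElem_map, List.length_map]
    rw [List.getElem_reverse]
    simp only [length_specT]
    rw [specT_get ds 0 1 (ds.length - 1 - i) hj]
    have hd : ds[ds.length - 1 - i] < 10 := hds _ (List.getElem_mem _)
    have hoc := ofChars?_digitChar _ hd
    have hpot : ((ds.length : Int) - (0 + (i : Int)) - 1) = ((0 : Int) + (ds.length - 1 - i : Nat)) := by
      omega
    simp only [termOf, terminoA, terminoB, hoc, Option.getD_some]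
    rw [hpot]

-- ===== VERDICT =====
theorem descomponer_base_10_spec : Claim_equal_descomponer_base_10 := by
  intro numero _ hpre
  unfold Spec_descomponer_base_10
  by_cases h0 : numero = 0
  · subst h0; decide
  · have hpos : 0 < numero := lt_of_le_of_ne hpre (Ne.symm h0)
    set m := numero.toNat with hm
    have hnum : numero = (m : Int) := (Int.toNat_of_nonneg hpre).symm
    have hmpos : 0 < m := by omega
    have hchars : PySem.Int.toChars numero = ((Nat.digits 10 m).map Nat.digitChar).reverse := by
      rw [hnum]
      simp [PySem.Int.toChars, not_lt.mpr (Int.natCast_nonneg m)]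
      exact toDigits_eq m hmpos
    have hds : ∀ d ∈ Nat.digits 10 m, d < 10 := fun d hd =>
      Nat.digits_lt_base (by norm_num) hd
    have hlen : (PySem.Int.toChars numero).length = (Nat.digits 10 m).length := by
      rw [hchars]; simp
    unfold descomponer_base_10 descomponer_base_10_alt
    rw [if_neg h0]
    simp only []
    rw [altLoop_eq m 0 1]
    rw [hchars]
    rw [foldA]
    have hcast : ((((Nat.digits 10 m).map Nat.digitChar).reverse).length : Int)
        = ((Nat.digits 10 m).length : Int) := by simp
    rw [hcast]
    rw [map_pasoOf _ hds, map_termOf _ hds]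
    simp
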